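-- pv_equiv track=rewrite | github.com/Larsvanderlaan/ppi-aipw | experiments/llm_eval_benchmark.py | select_representative_n_values
-- ===== SOURCE A (Python) =====
-- from typing import Any, Callable, Optional, Sequence
--
-- def select_representative_n_values(values: Sequence[object]) -> list[int]:
--     unique_values = sorted({int(value) for value in values})
--     if not unique_values:
--         return []
--     chosen = [
--         unique_values[0],
--         unique_values[len(unique_values) // 2],
--         unique_values[-1],
--     ]
--     return list(dict.fromkeys(chosen))
-- ===== SOURCE B (Python) =====
-- def _quickselect(xs, k):
--     # k-th smallest of a duplicate-free list; median-of-three pivot, iterative.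
--     while True:
--         a, b, c = xs[0], xs[len(xs) // 2], xs[-1]
--         p = max(min(a, b), min(max(a, b), c))
--         lt = [x for x in xs if x < p]
--         if k < len(lt):
--             xs = lt
--         elif k == len(lt):
--             return p
--         else:
--             xs = [x for x in xs if x > p]
--             k -= len(lt) + 1
--
-- def select_representative_n_values(values):
--     uniq = list({int(v) for v in values})
--     if not uniq:
--         return []
--     lo = min(uniq)
--     hi = max(uniq)
--     if lo == hi:
--         return [lo]
--     if len(uniq) == 2:
--         return [lo, hi]
--     return [lo, _quickselect(uniq, len(uniq) // 2), hi]
-- ===== Notes on version B (the rewrite author's own statement) =====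
-- stated objective: alternative
-- what changed: Replaces sorting the deduplicated values with direct min/max scans plus an iterative middle-pivot quickselect for the median-index unique value, avoiding the full O(n log n) sort.
import Mathlib
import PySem

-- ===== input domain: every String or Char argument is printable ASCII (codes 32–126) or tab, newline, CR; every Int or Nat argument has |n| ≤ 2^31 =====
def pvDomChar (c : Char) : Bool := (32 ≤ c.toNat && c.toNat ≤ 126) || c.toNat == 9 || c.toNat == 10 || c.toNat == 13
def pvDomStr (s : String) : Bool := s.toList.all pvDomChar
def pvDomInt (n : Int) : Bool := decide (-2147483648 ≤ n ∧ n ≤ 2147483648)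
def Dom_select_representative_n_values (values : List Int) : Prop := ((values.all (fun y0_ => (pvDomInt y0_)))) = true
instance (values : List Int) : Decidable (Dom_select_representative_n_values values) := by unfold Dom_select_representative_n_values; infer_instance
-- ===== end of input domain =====

-- B replaces A's full sort of the deduplicated values by min/max scans plus a quickselect
-- for the median-index unique value (return values proved equal; no mutation involved).

-- ===== PORT A =====
-- sorted({int(v) for v in values}); pick first, middle, last; dedup preserving order.
def select_representative_n_values (values : List Int) : List Int :=
  let unique_values := PySem.List.sorted (PySem.Set.ofList values) id
  if unique_values = [] then []
  else
    let chosen : List Int :=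
      [PySem.List.pyGetD unique_values 0 0,
       PySem.List.pyGetD unique_values (PySem.Int.floordiv (unique_values.length : Int) 2) 0,
       PySem.List.pyGetD unique_values (-1) 0]
    PySem.List.dedup chosen

-- ===== PORT B =====
-- median-of-three pivot (Source B computes it with max/min exactly so)
def pvMed3 (a b c : Int) : Int := max (min a b) (min (max a b) c)

-- the pivot is one of its three arguments (cited by pvQsel's termination proof)
lemma pv_med3_mem (a b c : Int) : pvMed3 a b c = a ∨ pvMed3 a b c = b ∨ pvMed3 a b c = c := by
  unfold pvMed3
  rcases le_total a b with h1 | h1 <;> rcases le_total a c with h2 | h2 <;>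
    rcases le_total b c with h3 | h3 <;> simp [h1, h2, h3]

lemma pv_pivot_mem (l : List Int) (h : l ≠ []) :
    pvMed3 (l.getD 0 0) (l.getD (l.length / 2) 0) (l.getD (l.length - 1) 0) ∈ l := by
  have h0 : 0 < l.length := List.length_pos_iff.mpr h
  have h1 : l.length / 2 < l.length := by omega
  have h2 : l.length - 1 < l.length := by omega
  rcases pv_med3_mem (l.getD 0 0) (l.getD (l.length / 2) 0) (l.getD (l.length - 1) 0) with h' | h' | h' <;>
    rw [h']
  · rw [List.getD_eq_getElem _ _ h0]; exact List.getElem_mem _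
  · rw [List.getD_eq_getElem _ _ h1]; exact List.getElem_mem _
  · rw [List.getD_eq_getElem _ _ h2]; exact List.getElem_mem _

-- quickselect: k-th smallest of a duplicate-free list (Source B's _quickselect),
-- median-of-three pivot; the Python loop's state (xs, k) becomes recursion arguments.
-- On [] the Python helper would raise IndexError; B never calls it so; 0 is unreachable filler.
def pvQsel (xs : List Int) (k : Nat) : Int :=
  match xs with
  | [] => 0
  | a :: as =>
    let p := pvMed3 ((a :: as).getD 0 0) ((a :: as).getD ((a :: as).length / 2) 0)
      ((a :: as).getD ((a :: as).length - 1) 0)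
    let lt := (a :: as).filter (fun x => decide (x < p))
    if k < lt.length then pvQsel lt k
    else if k = lt.length then p
    else pvQsel ((a :: as).filter (fun x => decide (p < x))) (k - lt.length - 1)
termination_by xs.length
decreasing_by
  all_goals
    exact List.length_filter_lt_length_iff_exists.mpr
      ⟨_, pv_pivot_mem (a :: as) (by simp), by simp⟩

def select_representative_n_values_alt (values : List Int) : List Int :=
  let uniq : List Int := PySem.Set.ofList values
  if uniq = [] then []
  else
    let lo := (PySem.List.min? uniq id).getD 0
    let hi := (PySem.List.max? uniq id).getD 0
    if lo = hi then [lo]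
    else if uniq.length = 2 then [lo, hi]
    else [lo, pvQsel uniq (uniq.length / 2), hi]

-- ===== PRECONDITION & SPEC =====
def Spec_select_representative_n_values (values : List Int) (out : List Int) : Prop := out = select_representative_n_values_alt values
instance (values : List Int) (out : List Int) : Decidable (Spec_select_representative_n_values values out) := by unfold Spec_select_representative_n_values; infer_instance

-- ===== CLAIM (what is proved, stated in full; the proofs are below) =====
def Claim_equal_select_representative_n_values : Prop := ∀ (values : List Int), Dom_select_representative_n_values values → Spec_select_representative_n_values values (select_representative_n_values values)

-- ===== LEMMAS AND PROOFS =====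

-- strictly increasing view of the sorted deduplicated list
lemma pv_sorted_strict (u : List Int) (hu : u.Nodup) :
    (PySem.List.sorted u id).Pairwise (· < ·) := by
  have hle := PySem.List.sorted_pairwise u id
  have hnd : (PySem.List.sorted u id).Nodup :=
    (PySem.List.sorted_perm u id false).nodup_iff.mpr hu
  exact (List.Pairwise.and hle hnd).imp (fun h => lt_of_le_of_ne h.1 h.2)

lemma pv_foldl_some {α : Type} (f : Option α → α → Option α)
    (hf : ∀ a x, ∃ b, f (some a) x = some b) :
    ∀ (l : List α) (a : α), ∃ m, List.foldl f (some a) l = some m := by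
  intro l
  induction l with
  | nil => intro a; exact ⟨a, rfl⟩
  | cons y t ih =>
    intro a
    simp only [List.foldl_cons]
    obtain ⟨b, hb⟩ := hf a y
    rw [hb]; exact ih b

lemma pv_min?_isSome (xs : List Int) (h : xs ≠ []) :
    ∃ m, PySem.List.min? xs id = some m := by
  match xs with
  | x :: rest =>
    simp only [PySem.List.min?, List.foldl_cons]
    exact pv_foldl_some _ (fun a x => by dsimp only; split_ifs <;> exact ⟨_, rfl⟩) rest x

lemma pv_max?_isSome (xs : List Int) (h : xs ≠ []) :
    ∃ m, PySem.List.max? xs id = some m := by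
  match xs with
  | x :: rest =>
    simp only [PySem.List.max?, List.foldl_cons]
    exact pv_foldl_some _ (fun a x => by dsimp only; split_ifs <;> exact ⟨_, rfl⟩) rest x

-- quickselect computes the k-th entry of the sorted list (duplicate-free input)
lemma pv_qsel_aux : ∀ (n : Nat) (xs : List Int), xs.length ≤ n → xs.Nodup →
    ∀ k : Nat, k < xs.length → (PySem.List.sorted xs id)[k]? = some (pvQsel xs k) := by
  intro n
  induction n with
  | zero => intro xs hlen _ k hk; omega
  | succ n ih =>
    intro xs hlen hnd k hk
    match xs with
    | [] => simp at hk
    | a :: as =>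
      set l : List Int := a :: as with hl
      have hlpos : 0 < l.length := by simp [hl]
      set p := pvMed3 (l.getD 0 0) (l.getD (l.length / 2) 0) (l.getD (l.length - 1) 0) with hpdef
      have hpmem : p ∈ l := pv_pivot_mem l (by simp [hl])
      set lt := l.filter (fun x => decide (x < p)) with hltdef
      set gt := l.filter (fun x => decide (p < x)) with hgtdef
      have hndlt : lt.Nodup := hnd.filter _
      have hndgt : gt.Nodup := hnd.filter _
      have hpgt : p ∉ gt := fun hmem => by simpa using (List.mem_filter.mp hmem).2
      have hperm3 : (lt ++ p :: gt).Perm l := by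
        have h1 := List.filter_append_perm (fun x => decide (x < p)) l
        have h2 : (l.filter (fun x => !decide (x < p))).Perm (p :: gt) := by
          refine (List.perm_ext_iff_of_nodup (hnd.filter _) (List.nodup_cons.mpr ⟨hpgt, hndgt⟩)).mpr ?_
          intro x
          simp only [List.mem_filter, List.mem_cons, hgtdef]
          constructor
          · rintro ⟨hxl, hxp⟩
            by_cases hxe : x = p
            · exact Or.inl hxe
            · refine Or.inr ⟨hxl, ?_⟩
              simp only [Bool.not_eq_eq_eq_not, Bool.not_true, decide_eq_false_iff_not] at hxp
              simp only [decide_eq_true_eq]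
              omega
          · rintro (rfl | ⟨hxl, hxp⟩)
            · exact ⟨hpmem, by simp⟩
            · refine ⟨hxl, ?_⟩
              simp only [decide_eq_true_eq] at hxp
              simp only [Bool.not_eq_eq_eq_not, Bool.not_true, decide_eq_false_iff_not]
              omega
        exact ((List.Perm.append_left lt h2).symm.trans h1)
      have hS : PySem.List.sorted l id
          = PySem.List.sorted lt id ++ p :: PySem.List.sorted gt id := by
        apply PySem.List.sorted_eq_of_perm_of_pairwise_lt
        · exact (((PySem.List.sorted_perm lt id false).append
            ((PySem.List.sorted_perm gt id false).cons p)).trans hperm3)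
        · rw [List.pairwise_append]
          refine ⟨pv_sorted_strict lt hndlt, ?_, ?_⟩
          · rw [List.pairwise_cons]
            refine ⟨?_, pv_sorted_strict gt hndgt⟩
            intro b hb
            have : b ∈ gt := (PySem.List.sorted_perm gt id false).mem_iff.mp hb
            simpa using (List.mem_filter.mp this).2
          · intro x hx b hb
            simp only [id_eq]
            have hx' : x < p := by
              have : x ∈ lt := (PySem.List.sorted_perm lt id false).mem_iff.mp hx
              simpa using (List.mem_filter.mp this).2
            rcases List.mem_cons.mp hb with rfl | hb'
            · exact hx'
            · have : b ∈ gt := (PySem.List.sorted_perm gt id false).mem_iff.mp hb'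
              have : p < b := by simpa using (List.mem_filter.mp this).2
              omega
      have hllt : (PySem.List.sorted lt id).length = lt.length :=
        (PySem.List.sorted_perm lt id false).length_eq
      have hl3 : l.length = lt.length + gt.length + 1 := by
        have := hperm3.length_eq
        simp only [List.length_append, List.length_cons] at this
        omega
      rw [hS, pvQsel]
      simp only [← hl, ← hpdef, ← hltdef, ← hgtdef]
      by_cases h1 : k < lt.length
      · rw [if_pos h1, List.getElem?_append_left (by omega)]
        exact ih lt (by omega) hndlt k h1
      · rw [if_neg h1]
        by_cases h2 : k = lt.length
        · rw [if_pos h2, List.getElem?_append_right (by omega)]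
          simp [hllt, h2]
        · rw [if_neg h2, List.getElem?_append_right (by omega)]
          have hk' : k - lt.length = (k - lt.length - 1) + 1 := by omega
          rw [hllt, hk', List.getElem?_cons_succ]
          exact ih gt (by omega) hndgt _ (by omega)

lemma pv_qsel_eq (xs : List Int) (hnd : xs.Nodup) (k : Nat) (hk : k < xs.length) :
    (PySem.List.sorted xs id)[k]? = some (pvQsel xs k) :=
  pv_qsel_aux xs.length xs le_rfl hnd k hk

-- min/max over the unsorted deduplicated list are the first/last entries of its sorted form
lemma pv_min_eq (u : List Int) (hnd : u.Nodup) (h : u ≠ []) :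
    (PySem.List.sorted u id)[0]? = some ((PySem.List.min? u id).getD 0) := by
  obtain ⟨m, hm⟩ := pv_min?_isSome u h
  rw [hm]
  have hperm := PySem.List.sorted_perm u id false
  match hhs : PySem.List.sorted u id with
  | [] => exact absurd (hhs ▸ hperm).symm.eq_nil h
  | a :: t =>
    have hmem : m ∈ a :: t := hhs ▸ (hperm.mem_iff.mpr (PySem.List.min?_mem hm))
    have hmin := PySem.List.min?_isMin hm
    have hain : a ∈ u := hperm.subset (hhs ▸ List.mem_cons_self)
    have hpw : (a :: t).Pairwise (· < ·) := hhs ▸ pv_sorted_strict u hnd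
    rcases List.mem_cons.mp hmem with rfl | hmt
    · rfl
    · have h1 : a < m := (List.pairwise_cons.mp hpw).1 m hmt
      have h2 : m ≤ a := by simpa using hmin a hain
      omega

lemma pv_max_eq (u : List Int) (hnd : u.Nodup) (h : u ≠ []) :
    (PySem.List.sorted u id)[(PySem.List.sorted u id).length - 1]? = some ((PySem.List.max? u id).getD 0) := by
  obtain ⟨m, hm⟩ := pv_max?_isSome u h
  rw [hm]
  have hperm := PySem.List.sorted_perm u id false
  set s := PySem.List.sorted u id with hs
  have hsne : s ≠ [] := fun hnil => absurd (hnil ▸ hperm).symm.eq_nil h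
  have hL : 0 < s.length := List.length_pos_iff.mpr hsne
  have hmem : m ∈ s := hperm.mem_iff.mpr (PySem.List.max?_mem hm)
  have hmax := PySem.List.max?_isMax hm
  obtain ⟨i, hi, hie⟩ := List.mem_iff_getElem.mp hmem
  have hpw := pv_sorted_strict u hnd
  rw [← hs] at hpw
  have hidx : i = s.length - 1 := by
    by_contra hne
    have hilt : i < s.length - 1 := by omega
    have hlt : s[i] < s[s.length - 1] :=
      (List.pairwise_iff_getElem.mp hpw) i (s.length - 1) hi (by omega) hilt
    have hin : s[s.length - 1] ∈ u := hperm.subset (List.getElem_mem _)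
    have : s[s.length - 1] ≤ m := by simpa using hmax _ hin
    omega
  subst hidx
  rw [List.getElem?_eq_getElem hi, hie]
  rfl

-- dict.fromkeys-style dedup on three-element literals
lemma pv_dedup1 (a : Int) : PySem.List.dedup [a, a, a] = [a] := by
  simp [PySem.List.dedup, PySem.Set.ofList, PySem.Set.add]

lemma pv_dedup2 (a b : Int) (h : a ≠ b) : PySem.List.dedup [a, b, b] = [a, b] := by
  simp [PySem.List.dedup, PySem.Set.ofList, PySem.Set.add, h.symm]

lemma pv_dedup3 (a b c : Int) (h1 : a ≠ b) (h2 : a ≠ c) (h3 : b ≠ c) :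
    PySem.List.dedup [a, b, c] = [a, b, c] := by
  simp [PySem.List.dedup, PySem.Set.ofList, PySem.Set.add, h1.symm, h2.symm, h3.symm]

lemma pv_pyGetD_neg_one (s : List Int) (h : s ≠ []) :
    PySem.List.pyGetD s (-1) 0 = s.getD (s.length - 1) 0 := by
  have hl : 0 < s.length := List.length_pos_iff.mpr h
  have h1 : -(s.length : Int) ≤ -1 := by omega
  simp [PySem.List.pyGetD, PySem.List.pyGet?, PySem.List.pyIdx?, h1, List.getD_eq_getElem?_getD]

theorem pv_main (values : List Int) :
    select_representative_n_values values = select_representative_n_values_alt values := by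
  have hnd : (PySem.Set.ofList values : List Int).Nodup := PySem.Set.nodup_ofList values
  set u : List Int := PySem.Set.ofList values with hu
  set s := PySem.List.sorted u id with hs
  have hperm : s.Perm u := PySem.List.sorted_perm u id false
  by_cases hempty : u = []
  · have hse' : PySem.List.sorted ([] : List Int) id = [] := rfl
    simp [select_representative_n_values, select_representative_n_values_alt, ← hu, hempty, hse']
  · have hsne : s ≠ [] := fun hnil => absurd (hnil ▸ hperm).symm.eq_nil hempty
    have hL : 0 < s.length := List.length_pos_iff.mpr hsne
    have hlen : s.length = u.length := hperm.length_eq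
    have hmid : PySem.Int.floordiv (s.length : Int) 2 = ((s.length / 2 : Nat) : Int) := by
      exact_mod_cast PySem.Int.floordiv_natCast s.length 2
    have hmin := pv_min_eq u hnd hempty
    have hmax := pv_max_eq u hnd hempty
    rw [← hs] at hmin hmax
    have hpw := pv_sorted_strict u hnd
    rw [← hs] at hpw
    have hget := List.pairwise_iff_getElem.mp hpw
    -- named entries
    have h0 : (0 : Nat) < s.length := hL
    have hm2 : s.length / 2 < s.length := by omega
    have hlast : s.length - 1 < s.length := by omega
    have hminv : (PySem.List.min? u id).getD 0 = s[0] := by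
      rw [List.getElem?_eq_getElem h0] at hmin
      exact (Option.some_injective _ hmin).symm
    have hmaxv : (PySem.List.max? u id).getD 0 = s[s.length - 1] := by
      rw [List.getElem?_eq_getElem hlast] at hmax
      exact (Option.some_injective _ hmax).symm
    have hAval : select_representative_n_values values
        = PySem.List.dedup [s[0], s[s.length / 2], s[s.length - 1]] := by
      rw [select_representative_n_values]
      simp only [← hu, ← hs, if_neg hsne]
      rw [pv_pyGetD_neg_one s hsne, hmid, PySem.List.pyGetD_ofNat', PySem.List.pyGetD_natCast]
      rw [List.getD_eq_getElem?_getD, List.getD_eq_getElem?_getD, List.getD_eq_getElem?_getD]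
      rw [List.getElem?_eq_getElem h0, List.getElem?_eq_getElem hm2, List.getElem?_eq_getElem hlast]
      rfl
    have hqsel : pvQsel u (u.length / 2) = s[s.length / 2] := by
      have hidx : u.length / 2 = s.length / 2 := by rw [hlen]
      rw [hidx]
      have hval := pv_qsel_eq u hnd (s.length / 2) (by omega)
      rw [← hs, List.getElem?_eq_getElem hm2] at hval
      exact (Option.some_injective _ hval).symm
    rw [hAval]
    rw [select_representative_n_values_alt]
    simp only [← hu, if_neg hempty, hminv, hmaxv]
    by_cases hc1 : s.length = 1
    · have e1 : s.length / 2 = 0 := by omega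
      have e2 : s.length - 1 = 0 := by omega
      simp only [e1, e2]
      rw [if_pos trivial, pv_dedup1]
    · by_cases hc2 : s.length = 2
      · have e1 : s.length / 2 = 1 := by omega
        have e2 : s.length - 1 = 1 := by omega
        have hne : s[0] ≠ s[1]'(by omega) := ne_of_lt (hget 0 1 (by omega) (by omega) (by omega))
        simp only [e1, e2]
        rw [if_neg hne, if_pos (by omega), pv_dedup2 _ _ hne]
      · have h3 : 3 ≤ s.length := by omega
        have hmgt : 0 < s.length / 2 := by omega
        have hmlt : s.length / 2 < s.length - 1 := by omega
        have hne1 : s[0] ≠ s[s.length / 2] := ne_of_lt (hget _ _ h0 hm2 hmgt)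
        have hne2 : s[0] ≠ s[s.length - 1] := ne_of_lt (hget _ _ h0 hlast (by omega))
        have hne3 : s[s.length / 2] ≠ s[s.length - 1] := ne_of_lt (hget _ _ hm2 hlast hmlt)
        rw [pv_dedup3 _ _ _ hne1 hne2 hne3]
        rw [if_neg hne2, if_neg (by omega), hqsel]

-- ===== VERDICT (by name: the statement is the Claim_ definition above) =====
theorem select_representative_n_values_spec : Claim_equal_select_representative_n_values := by
  intro values _
  unfold Spec_select_representative_n_values
  exact pv_main values
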